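-- pv_equiv track=rewrite | github.com/gosch/Katas-in-python | 2019/december/kuromasuPuzzle.py | kuromasuPuzzle
-- ===== SOURCE A (Python) =====
-- import copy
--
-- def count(board, x, y):
--     s = 0
--     for i in range(y + 1, len(board[0])):
--         if board[x][i] != '*':
--             s = s + 1
--         else:
--             break
--     for i in range(y - 1, -1, -1):
--         if board[x][i] != '*':
--             s = s + 1
--         else:
--             break
--     for i in range(x + 1, len(board)):
--         if board[i][y] != '*':
--             s = s + 1
--         else:
--             break
--     for i in range(x - 1, -1, -1):
--         if board[i][y] != '*':
--             s = s + 1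
--         else:
--             break
--     return s + 1
--
-- def kuromasuPuzzle(board):
--     c = copy.deepcopy(board)
--
--     for i in range(len(c)):
--         for j in range(len(c[i])):
--
--             if c[i][j] == '*' or c[i][j] == '.':
--                 c[i][j] = -1
--             else:
--                 c[i][j] = count(board, i, j)
--     return c
-- ===== SOURCE B (Python) =====
-- def _runs(line):
--     # run length of consecutive non-'*' cells immediately before each position
--     out, run = [], 0
--     for v in line:
--         out.append(run)
--         run = 0 if v == '*' else run + 1
--     return out
--
-- def kuromasuPuzzle(board):
--     n = len(board)
--     m = len(board[0]) if board else 0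
--     left = [_runs(r) for r in board]
--     right = [_runs(r[::-1])[::-1] for r in board]
--     cols = [[board[i][j] for i in range(n)] for j in range(m)]
--     up_t = [_runs(c) for c in cols]
--     down_t = [_runs(c[::-1])[::-1] for c in cols]
--     return [[-1 if v in ('*', '.') else
--              left[i][j] + right[i][j] + up_t[j][i] + down_t[j][i] + 1
--              for j, v in enumerate(r)] for i, r in enumerate(board)]
-- ===== Notes on version B (the rewrite author's own statement) =====
-- stated objective: faster
-- what changed: Replaces the per-cell four-directional scan (O(n+m) per cell) by four run-length DP sweeps computed once, so each cell's visibility count is a sum of four precomputed runs.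
-- outside the precondition, e.g. on kuromasuPuzzle([['*'], []]): A returns [[-1], []], B raises IndexError
import Mathlib
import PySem

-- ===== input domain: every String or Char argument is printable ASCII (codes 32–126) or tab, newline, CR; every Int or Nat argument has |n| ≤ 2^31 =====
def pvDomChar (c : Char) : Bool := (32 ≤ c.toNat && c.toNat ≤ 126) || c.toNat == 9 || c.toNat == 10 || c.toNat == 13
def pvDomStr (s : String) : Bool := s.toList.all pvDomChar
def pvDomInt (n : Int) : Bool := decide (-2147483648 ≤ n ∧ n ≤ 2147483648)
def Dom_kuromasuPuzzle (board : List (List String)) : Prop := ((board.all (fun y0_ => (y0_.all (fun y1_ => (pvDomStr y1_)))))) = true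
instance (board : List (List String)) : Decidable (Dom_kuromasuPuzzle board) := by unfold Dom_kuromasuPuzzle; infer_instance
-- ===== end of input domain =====

-- B replaces A's per-cell four-directional scan by four run-length DP sweeps computed once
-- (objective: faster, asymptotically O(n*m) instead of O(n*m*(n+m))).

-- ===== PORT A =====
-- board[x][y] with default (indices are in range wherever Python A returns; Pre_ excludes the rest)
def pvCell (board : List (List String)) (x y : Int) : String :=
  PySem.List.pyGetD (PySem.List.pyGetD board x []) y ""

-- one directional scan of `count`: walk the index list, +1 per non-'*' cell, stop at the first '*'
def pvCountDir (f : Int → String) : List Int → Int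
  | [] => 0
  | i :: rest => if f i ≠ "*" then 1 + pvCountDir f rest else 0

-- `count(board, x, y)` : the four scans plus 1
def pvCount (board : List (List String)) (x y : Int) : Int :=
  pvCountDir (fun i => pvCell board x i)
      (PySem.List.pyRange (y + 1) ((PySem.List.pyGetD board 0 []).length : Int) 1)
  + pvCountDir (fun i => pvCell board x i) (PySem.List.pyRange (y - 1) (-1) (-1))
  + pvCountDir (fun i => pvCell board i y) (PySem.List.pyRange (x + 1) (board.length : Int) 1)
  + pvCountDir (fun i => pvCell board i y) (PySem.List.pyRange (x - 1) (-1) (-1))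
  + 1

def kuromasuPuzzle (board : List (List String)) : List (List Int) :=
  (PySem.List.enumerate board 0).map (fun p =>
    (PySem.List.enumerate p.2 0).map (fun q =>
      if q.2 = "*" ∨ q.2 = "." then -1 else pvCount board p.1 q.1))

-- ===== PORT B =====
-- `_runs`: run length of consecutive non-'*' cells immediately before each position
def pvRunsAux (run : Int) : List String → List Int
  | [] => []
  | v :: t => run :: pvRunsAux (if v = "*" then 0 else run + 1) t

def pvRuns (line : List String) : List Int := pvRunsAux 0 line

-- left[i][j] etc. (nonnegative in-range indexing wherever Python B returns)
def pvIdx (xss : List (List Int)) (i j : Int) : Int :=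
  PySem.List.pyGetD (PySem.List.pyGetD xss i []) j 0

def kuromasuPuzzle_alt (board : List (List String)) : List (List Int) :=
  let n := board.length
  let m := (board.headD []).length
  let left := board.map pvRuns
  let right := board.map (fun r => (pvRuns r.reverse).reverse)
  let cols := (List.range m).map (fun j => (List.range n).map (fun i => (board.getD i []).getD j ""))
  let upT := cols.map pvRuns
  let downT := cols.map (fun c => (pvRuns c.reverse).reverse)
  (PySem.List.enumerate board 0).map (fun p =>
    (PySem.List.enumerate p.2 0).map (fun q =>
      if q.2 = "*" ∨ q.2 = "." then -1
      else pvIdx left p.1 q.1 + pvIdx right p.1 q.1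
           + pvIdx upT q.1 p.1 + pvIdx downT q.1 p.1 + 1))

-- ===== PRECONDITION & SPEC =====
-- Pre_ excludes ragged boards (rows of unequal length): there A usually raises IndexError, and when it
-- happens to return, its counts (clipped to len(board[0]) columns) are an artefact of its implementation.
def Pre_kuromasuPuzzle (board : List (List String)) : Prop :=
  ∀ r ∈ board, r.length = (board.headD []).length

instance (board : List (List String)) : Decidable (Pre_kuromasuPuzzle board) := by
  unfold Pre_kuromasuPuzzle; infer_instance

def pvWitness_kuromasuPuzzle : List (List String) := [["a", "*"], [".", "b"]]

def Spec_kuromasuPuzzle (board : List (List String)) (out : List (List Int)) : Prop := out = kuromasuPuzzle_alt board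
instance (board : List (List String)) (out : List (List Int)) : Decidable (Spec_kuromasuPuzzle board out) := by unfold Spec_kuromasuPuzzle; infer_instance

-- ===== CLAIM (what is proved, stated in full; the proofs are below) =====
def Claim_equal_kuromasuPuzzle : Prop := ∀ (board : List (List String)), Dom_kuromasuPuzzle board → Pre_kuromasuPuzzle board → Spec_kuromasuPuzzle board (kuromasuPuzzle board)

-- ===== LEMMAS AND PROOFS =====

-- number of leading non-'*' cells of a cell list (the value both programs compute per direction)
def pvVis : List String → Int
  | [] => 0
  | v :: t => if v ≠ "*" then 1 + pvVis t else 0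

theorem pvCountDir_eq_pvVis (f : Int → String) (l : List Int) :
    pvCountDir f l = pvVis (l.map f) := by
  induction l with
  | nil => rfl
  | cons i rest ih => simp only [pvCountDir, List.map, pvVis, ih]

theorem pvRunsAux_length (run : Int) (l : List String) : (pvRunsAux run l).length = l.length := by
  induction l generalizing run with
  | nil => rfl
  | cons v t ih => simp [pvRunsAux, ih]

theorem pvRunsAux_getD (l : List String) (p : List String) (k : Nat) (hk : k < l.length) :
    (pvRunsAux (pvVis p) l).getD k 0 = pvVis ((l.take k).reverse ++ p) := by
  induction l generalizing p k with
  | nil => simp at hk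
  | cons v t ih =>
    cases k with
    | zero => simp [pvRunsAux]
    | succ k =>
      have hstep : (if v = "*" then 0 else pvVis p + 1) = pvVis (v :: p) := by
        by_cases hv : v = "*"
        · simp [pvVis, hv]
        · simp [pvVis, hv]
          omega
      have hk' : k < t.length := by simpa using hk
      calc (pvRunsAux (pvVis p) (v :: t)).getD (k + 1) 0
          = (pvRunsAux (pvVis (v :: p)) t).getD k 0 := by
            simp [pvRunsAux, hstep]
        _ = pvVis ((t.take k).reverse ++ (v :: p)) := ih (v :: p) k hk'
        _ = pvVis (((v :: t).take (k + 1)).reverse ++ p) := by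
            simp

theorem pvRuns_getD (l : List String) (k : Nat) (hk : k < l.length) :
    (pvRuns l).getD k 0 = pvVis (l.take k).reverse := by
  have h0 : (0 : Int) = pvVis [] := rfl
  have := pvRunsAux_getD l [] k hk
  simpa [pvRuns, h0] using this

theorem pvRuns_rev_getD (l : List String) (k : Nat) (hk : k < l.length) :
    ((pvRuns l.reverse).reverse).getD k 0 = pvVis (l.drop (k + 1)) := by
  have hlen : (pvRuns l.reverse).length = l.length := by
    simp [pvRuns, pvRunsAux_length]
  have hk2 : l.length - 1 - k < l.reverse.length := by simp; omega
  have hrev : ((pvRuns l.reverse).reverse).getD k 0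
      = (pvRuns l.reverse).getD (l.length - 1 - k) 0 := by
    have hklt : k < (pvRuns l.reverse).reverse.length := by simp [hlen]; omega
    rw [List.getD_eq_getElem _ _ hklt,
        List.getD_eq_getElem _ _ (by simpa [hlen] using hk2)]
    rw [List.getElem_reverse]
    congr 1
    omega
  rw [hrev, pvRuns_getD l.reverse (l.length - 1 - k) hk2]
  congr 1
  -- l.reverse.take (len-1-k) = (l.drop (k+1)).reverse
  have hsplit : l.reverse = (l.drop (k + 1)).reverse ++ (l.take (k + 1)).reverse := by
    rw [← List.reverse_append, List.take_append_drop]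
  rw [hsplit, List.take_append_of_le_length (by simp; omega)]
  rw [List.take_of_length_le (by simp; omega), List.reverse_reverse]

theorem pvScanFwd (row : List String) (j : Nat) :
    (PySem.List.pyRange ((j:Int)+1) (row.length:Int) 1).map (fun i => PySem.List.pyGetD row i "") = row.drop (j+1) := by
  have := PySem.List.map_pyGetD_pyRange' row "" (a := (j:Int)+1) (by positivity)
  simpa using this

theorem pvScanBwd (row : List String) (j : Nat) (hj : j ≤ row.length) :
    (PySem.List.pyRange ((j:Int)-1) (-1) (-1)).map (fun i => PySem.List.pyGetD row i "") = (row.take j).reverse := by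
  rw [PySem.List.pyRange_neg_one_eq_reverse, List.map_reverse]
  congr 1
  have h1 : (-1:Int)+1 = 0 := by ring
  have h2 : ((j:Int)-1)+1 = (j:Int) := by ring
  rw [h1, h2]
  have hlen : (row.take j).length = j := by simp [hj]
  have hmap := PySem.List.map_pyGetD_pyRange' (row.take j) "" (a := 0) le_rfl
  rw [hlen] at hmap
  simp only [Int.toNat_zero, List.drop_zero] at hmap
  rw [← hmap]
  apply List.map_congr_left
  intro x hx
  rw [PySem.List.mem_pyRange_one] at hx
  obtain ⟨h0, hlt⟩ := hx
  rw [PySem.List.pyGetD_of_nonneg _ _ h0, PySem.List.pyGetD_of_nonneg _ _ h0]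
  rw [List.getD_eq_getElem?_getD, List.getD_eq_getElem?_getD]
  rw [List.getElem?_take]
  have hxj : x.toNat < j := by omega
  simp [hxj]

-- the column list B builds, named for the proofs
def pvCols (board : List (List String)) : List (List String) :=
  (List.range (board.headD []).length).map
    (fun j => (List.range board.length).map (fun i => (board.getD i []).getD j ""))

theorem pvCols_getD (board : List (List String)) (j : Nat) (hj : j < (board.headD []).length) :
    (pvCols board).getD j [] = (List.range board.length).map (fun i => (board.getD i []).getD j "") := by
  unfold pvCols
  rw [PySem.List.getD_map_range _ _ _ _ hj]

-- per-cell equality of the two programs (k row index, j column index)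
theorem pvCell_eq (board : List (List String)) (hPre : Pre_kuromasuPuzzle board)
    (k j : Nat) (hk : k < board.length) (hj : j < (board.getD k []).length) :
    pvCount board (k:Int) (j:Int) =
      pvIdx (board.map pvRuns) (k:Int) (j:Int)
      + pvIdx (board.map (fun r => (pvRuns r.reverse).reverse)) (k:Int) (j:Int)
      + pvIdx ((pvCols board).map pvRuns) (j:Int) (k:Int)
      + pvIdx ((pvCols board).map (fun c => (pvRuns c.reverse).reverse)) (j:Int) (k:Int)
      + 1 := by
  set row := board.getD k [] with hrow
  have hm : row.length = (board.headD []).length := by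
    apply hPre
    rw [hrow, List.getD_eq_getElem _ _ hk]
    exact List.getElem_mem hk
  set col := (List.range board.length).map (fun i => (board.getD i []).getD j "") with hcol
  have hcollen : col.length = board.length := by simp [hcol]
  -- A's row getter is plain indexing into row
  have hgetrow : ∀ i : Int, pvCell board (k:Int) i = PySem.List.pyGetD row i "" := by
    intro i
    unfold pvCell
    rw [PySem.List.pyGetD_natCast]
  -- A's column getter agrees with indexing into col on in-range indices
  have hgetcol : ∀ t : Int, 0 ≤ t → t < (board.length : Int) →
      pvCell board t (j:Int) = PySem.List.pyGetD col t "" := by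
    intro t h0 hlt
    unfold pvCell
    rw [PySem.List.pyGetD_of_nonneg _ _ h0, PySem.List.pyGetD_of_nonneg _ _ h0]
    rw [hcol, PySem.List.getD_map_range _ _ _ _ (by omega)]
    rw [PySem.List.pyGetD_natCast]
  -- the four directions
  have hA1 : pvCountDir (fun i => pvCell board (k:Int) i)
      (PySem.List.pyRange ((j:Int)+1) ((PySem.List.pyGetD board 0 []).length : Int) 1)
      = pvVis (row.drop (j+1)) := by
    have hb0 : PySem.List.pyGetD board (0:Int) [] = board.headD [] := by
      cases board with
      | nil => rfl
      | cons r t => simp [PySem.List.pyGetD_ofNat']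
    rw [pvCountDir_eq_pvVis]
    simp only [hgetrow]
    rw [hb0, ← hm, pvScanFwd]
  have hA2 : pvCountDir (fun i => pvCell board (k:Int) i)
      (PySem.List.pyRange ((j:Int)-1) (-1) (-1)) = pvVis (row.take j).reverse := by
    rw [pvCountDir_eq_pvVis]
    simp only [hgetrow]
    rw [pvScanBwd row j (by omega)]
  have hA3 : pvCountDir (fun i => pvCell board i (j:Int))
      (PySem.List.pyRange ((k:Int)+1) (board.length : Int) 1) = pvVis (col.drop (k+1)) := by
    rw [pvCountDir_eq_pvVis]
    have hb : ((board.length : Nat) : Int) = ((col.length : Nat) : Int) := by rw [hcollen]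
    rw [hb]
    have hmc := List.map_congr_left (l := PySem.List.pyRange ((k:Int)+1) ((col.length : Nat) : Int) 1)
      (f := fun x => pvCell board x (j:Int)) (g := fun x => PySem.List.pyGetD col x "")
      (fun x hx => by
        rw [PySem.List.mem_pyRange_one] at hx
        exact hgetcol x (by omega) (by omega))
    rw [hmc, pvScanFwd]
  have hA4 : pvCountDir (fun i => pvCell board i (j:Int))
      (PySem.List.pyRange ((k:Int)-1) (-1) (-1)) = pvVis (col.take k).reverse := by
    rw [pvCountDir_eq_pvVis]
    have hmc := List.map_congr_left (l := PySem.List.pyRange ((k:Int)-1) (-1) (-1))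
      (f := fun x => pvCell board x (j:Int)) (g := fun x => PySem.List.pyGetD col x "")
      (fun x hx => by
        rw [PySem.List.mem_pyRange_neg_one] at hx
        exact hgetcol x (by omega) (by omega))
    rw [hmc, pvScanBwd col k (by omega)]
  -- B's four table lookups
  have hB1 : pvIdx (board.map pvRuns) (k:Int) (j:Int) = pvVis (row.take j).reverse := by
    unfold pvIdx
    rw [PySem.List.pyGetD_natCast, PySem.List.pyGetD_natCast]
    have h1 : (board.map pvRuns).getD k [] = pvRuns row := by
      rw [List.getD_eq_getElem _ _ (by simpa using hk), List.getElem_map,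
          ← List.getD_eq_getElem _ [] hk]
    rw [h1]
    exact pvRuns_getD row j hj
  have hB2 : pvIdx (board.map (fun r => (pvRuns r.reverse).reverse)) (k:Int) (j:Int)
      = pvVis (row.drop (j+1)) := by
    unfold pvIdx
    rw [PySem.List.pyGetD_natCast, PySem.List.pyGetD_natCast]
    have h1 : (board.map (fun r => (pvRuns r.reverse).reverse)).getD k [] = (pvRuns row.reverse).reverse := by
      rw [List.getD_eq_getElem _ _ (by simpa using hk), List.getElem_map,
          ← List.getD_eq_getElem _ [] hk]
    rw [h1]
    exact pvRuns_rev_getD row j hj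
  have hkcol : k < col.length := by omega
  have hB3 : pvIdx ((pvCols board).map pvRuns) (j:Int) (k:Int) = pvVis (col.take k).reverse := by
    unfold pvIdx
    rw [PySem.List.pyGetD_natCast, PySem.List.pyGetD_natCast]
    have hjm : j < (board.headD []).length := by omega
    have hjc : j < (pvCols board).length := by
      unfold pvCols; rw [List.length_map, List.length_range]; exact hjm
    have h1 : ((pvCols board).map pvRuns).getD j [] = pvRuns col := by
      rw [List.getD_eq_getElem _ _ (by simpa using hjc), List.getElem_map,
          ← List.getD_eq_getElem _ [] hjc, pvCols_getD board j hjm]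
    rw [h1]
    exact pvRuns_getD col k hkcol
  have hB4 : pvIdx ((pvCols board).map (fun c => (pvRuns c.reverse).reverse)) (j:Int) (k:Int)
      = pvVis (col.drop (k+1)) := by
    unfold pvIdx
    rw [PySem.List.pyGetD_natCast, PySem.List.pyGetD_natCast]
    have hjm : j < (board.headD []).length := by omega
    have hjc : j < (pvCols board).length := by
      unfold pvCols; rw [List.length_map, List.length_range]; exact hjm
    have h1 : ((pvCols board).map (fun c => (pvRuns c.reverse).reverse)).getD j [] = (pvRuns col.reverse).reverse := by
      rw [List.getD_eq_getElem _ _ (by simpa using hjc), List.getElem_map,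
          ← List.getD_eq_getElem _ [] hjc, pvCols_getD board j hjm]
    rw [h1]
    exact pvRuns_rev_getD col k hkcol
  unfold pvCount
  rw [hA1, hA2, hA3, hA4, hB1, hB2, hB3, hB4]
  ring

-- ===== VERDICT (by name: the statement is the Claim_ definition above) =====
theorem kuromasuPuzzle_spec : Claim_equal_kuromasuPuzzle := by
  intro board _hDom hPre
  unfold Spec_kuromasuPuzzle kuromasuPuzzle kuromasuPuzzle_alt
  simp only []
  apply List.map_congr_left
  intro p hp
  rw [PySem.List.mem_enumerate_iff] at hp
  obtain ⟨k, hk, rfl⟩ := hp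
  apply List.map_congr_left
  intro q hq
  rw [PySem.List.mem_enumerate_iff] at hq
  obtain ⟨j, hj, rfl⟩ := hq
  simp only [zero_add]
  by_cases hstar : board[k][j] = "*" ∨ board[k][j] = "."
  · simp [hstar]
  · rw [if_neg hstar, if_neg hstar]
    have hj' : j < (board.getD k []).length := by rw [List.getD_eq_getElem _ _ hk]; exact hj
    have h := pvCell_eq board hPre k j hk hj'
    simpa only [pvCols] using h
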